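-- pv_equiv track=rewrite | github.com/miliar/Code_Jam_Webscraper | solutions_python/Problem_178/1064.py | SolvePancakes
-- ===== SOURCE A (Python) =====
-- def FlipPancakes(pancakes, i):
--   for index in range(i):
--     pancakes[index] = not pancakes[index]
--   if i >= 2:
--     pancakes[:i] = pancakes[i-1::-1]
--   return pancakes
--
-- def SolvePancakes(pancakes):
--   count = 0
--   while not all(pancakes):
--     if pancakes[0]:
--       i = pancakes.index(False)
--     else:
--       i = len(pancakes) - pancakes[::-1].index(False)
--     pancakes = FlipPancakes(pancakes, i)
--     count += 1
--   return count
-- ===== SOURCE B (Python) =====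
-- def SolvePancakes(pancakes):
--   # One pass: each greedy prefix-flip of A merges exactly one run boundary, so the
--   # answer is the number of maximal runs of equal values, minus one if the last
--   # run already consists of True.  (A mutates its argument in place; B does not --
--   # the equivalence claimed is about the return value only.)
--   runs = 0
--   prev = None
--   for p in pancakes:
--     if p != prev:
--       runs += 1
--       prev = p
--   if pancakes and pancakes[-1]:
--     runs -= 1
--   return runs
-- ===== Notes on version B (the rewrite author's own statement) =====
-- stated objective: faster
-- what changed: Replaces the simulated greedy flipping loop (repeated index scans, prefix negation and reversal) by a single pass that counts maximal runs of equal values and subtracts one when the list ends in True.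
import Mathlib
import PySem

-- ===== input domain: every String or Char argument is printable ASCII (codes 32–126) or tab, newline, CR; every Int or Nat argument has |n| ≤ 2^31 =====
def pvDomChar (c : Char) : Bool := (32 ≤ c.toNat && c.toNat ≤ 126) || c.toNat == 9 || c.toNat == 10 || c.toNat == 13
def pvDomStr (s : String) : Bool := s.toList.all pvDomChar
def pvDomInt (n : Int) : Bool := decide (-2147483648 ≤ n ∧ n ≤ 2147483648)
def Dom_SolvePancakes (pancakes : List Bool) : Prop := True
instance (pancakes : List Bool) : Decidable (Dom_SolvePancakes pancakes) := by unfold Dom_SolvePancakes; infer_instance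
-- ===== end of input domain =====

-- B replaces A's quadratic greedy flip simulation by a single O(n) pass counting runs
-- of equal values (return-value equivalence only: Python A mutates its argument list).


-- ===== PORT A =====
-- 'for index in range(i): pancakes[index] = not pancakes[index]' negates exactly
-- the entries with index < i; 'pancakes[:i] = pancakes[i-1::-1]' reverses the
-- first i entries when i >= 2.
def FlipPancakesL (p : List Bool) (i : Nat) : List Bool :=
  let q := p.mapIdx (fun idx x => if idx < i then !x else x)
  if 2 ≤ i then (q.take i).reverse ++ q.drop i else q

-- the index chosen inside A's while loop ('pancakes.index(False)' /
-- 'len(pancakes) - pancakes[::-1].index(False)')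
def pancakeIdx (p : List Bool) : Nat :=
  if PySem.List.pyGetD p 0 false then (PySem.List.index? p false).getD 0
  else p.length - (PySem.List.index? p.reverse false).getD 0

-- 'while not all(pancakes)': structural recursion on a fuel counter; the fuel
-- 'length + 1' only makes the loop total (it is proved below never to run out),
-- the computation performed is exactly A's loop.
def solveLoop : Nat → List Bool → Int → Int
  | 0, _, count => count
  | fuel + 1, p, count =>
    if p.all id then count
    else solveLoop fuel (FlipPancakesL p (pancakeIdx p)) (count + 1)

def SolvePancakes (pancakes : List Bool) : Int :=
  solveLoop (pancakes.length + 1) pancakes 0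

-- ===== PORT B =====
def SolvePancakes_alt (pancakes : List Bool) : Int :=
  let acc := pancakes.foldl
    (fun (acc : Int × Option Bool) x => if some x ≠ acc.2 then (acc.1 + 1, some x) else acc)
    (0, none)
  if pancakes ≠ [] ∧ PySem.List.pyGetD pancakes (-1) false then acc.1 - 1 else acc.1

-- ===== PRECONDITION & SPEC =====
def Spec_SolvePancakes (pancakes : List Bool) (out : Int) : Prop := out = SolvePancakes_alt pancakes
instance (pancakes : List Bool) (out : Int) : Decidable (Spec_SolvePancakes pancakes out) := by unfold Spec_SolvePancakes; infer_instance

-- ===== CLAIM (what is proved, stated in full; the proofs are below) =====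
def Claim_equal_SolvePancakes : Prop := ∀ (pancakes : List Bool), Dom_SolvePancakes pancakes → Spec_SolvePancakes pancakes (SolvePancakes pancakes)

-- ===== LEMMAS AND PROOFS =====

-- The number of loop iterations A performs: number of maximal runs, minus one if
-- the list ends in true.
def pvRuns : List Bool → Nat
  | [] => 0
  | [_] => 1
  | a :: b :: t => (if a == b then 0 else 1) + pvRuns (b :: t)

def pvMval (p : List Bool) : Nat :=
  pvRuns p - (if p.getLast? = some true then 1 else 0)

theorem pvRuns_cons_cons (a b : Bool) (t : List Bool) :
    pvRuns (a :: b :: t) = (if a == b then 0 else 1) + pvRuns (b :: t) := rfl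

theorem pvRuns_cons (a : Bool) (t : List Bool) :
    pvRuns (a :: t) = (if t.head? = some a then 0 else 1) + pvRuns t := by
  cases t with
  | nil => simp [pvRuns]
  | cons b s =>
    rw [pvRuns_cons_cons]
    by_cases hab : a = b
    · simp [hab]
    · simp [hab, Ne.symm hab]

theorem pvRuns_pos (a : Bool) (t : List Bool) : 0 < pvRuns (a :: t) := by
  induction t generalizing a with
  | nil => simp [pvRuns]
  | cons b s ih =>
    have := ih b
    rw [pvRuns_cons]
    omega

theorem pvRuns_pos' (l : List Bool) (h : l ≠ []) : 0 < pvRuns l := by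
  cases l with
  | nil => exact absurd rfl h
  | cons a t => exact pvRuns_pos a t

theorem pvRuns_replicate_append_eq (k : Nat) (c : Bool) (t : List Bool)
    (h : t.head? = some c) :
    pvRuns (List.replicate k c ++ t) = pvRuns t := by
  induction k with
  | zero => simp
  | succ k ih =>
    have hh : (List.replicate k c ++ t).head? = some c := by
      cases k with
      | zero => simpa using h
      | succ m => simp [List.replicate_succ]
    rw [List.replicate_succ, List.cons_append, pvRuns_cons, hh, ih]
    simp

theorem pvRuns_replicate_append_ne (k : Nat) (hk : 1 ≤ k) (c : Bool) (t : List Bool)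
    (h : t.head? = some (!c)) :
    pvRuns (List.replicate k c ++ t) = 1 + pvRuns t := by
  induction k with
  | zero => omega
  | succ k ih =>
    cases k with
    | zero =>
      simp only [List.replicate_succ, List.replicate_zero, List.nil_append, List.cons_append]
      rw [pvRuns_cons, h]
      cases c <;> simp
    | succ m =>
      rw [List.replicate_succ, List.cons_append, pvRuns_cons]
      have hh : (List.replicate (m + 1) c ++ t).head? = some c := by
        simp [List.replicate_succ]
      rw [hh, ih (by omega)]
      simp

theorem pvRuns_map_not (p : List Bool) :
    pvRuns (p.map (fun x => !x)) = pvRuns p := by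
  induction p using pvRuns.induct with
  | case1 => rfl
  | case2 a => rfl
  | case3 a b t ih =>
    simp only [List.map_cons] at ih ⊢
    rw [pvRuns_cons_cons, pvRuns_cons_cons, ih]
    have : ((!a) == (!b)) = (a == b) := by cases a <;> cases b <;> rfl
    rw [this]

theorem pvRuns_append_singleton (p : List Bool) (a : Bool) :
    pvRuns (p ++ [a]) = (if p.getLast? = some a then 0 else 1) + pvRuns p := by
  induction p using pvRuns.induct with
  | case1 => simp [pvRuns]
  | case2 b =>
    have e1 : pvRuns ([b] ++ [a]) = (if b == a then 0 else 1) + 1 := rfl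
    rw [e1]
    by_cases hab : b = a
    · simp [hab, pvRuns]
    · simp [hab, Ne.symm hab, pvRuns]
  | case3 b c t ih =>
    have h1 : (b :: c :: t) ++ [a] = b :: ((c :: t) ++ [a]) := by simp
    rw [h1, List.cons_append, pvRuns_cons_cons, ← List.cons_append, ih, pvRuns_cons_cons]
    have h4 : (b :: c :: t).getLast? = (c :: t).getLast? := by simp [List.getLast?_cons]
    rw [h4]
    omega

theorem pvRuns_reverse (p : List Bool) : pvRuns p.reverse = pvRuns p := by
  induction p with
  | nil => rfl
  | cons a t ih =>
    rw [List.reverse_cons, pvRuns_append_singleton, List.getLast?_reverse, ih, pvRuns_cons]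

theorem pvRuns_append_replicate_eq (t : List Bool) (k : Nat) (c : Bool)
    (h : t.getLast? = some c) :
    pvRuns (t ++ List.replicate k c) = pvRuns t := by
  rw [← pvRuns_reverse, List.reverse_append, List.reverse_replicate,
    pvRuns_replicate_append_eq k c t.reverse (by rwa [List.head?_reverse]),
    pvRuns_reverse]

theorem pvRuns_append_replicate_ne (t : List Bool) (k : Nat) (hk : 1 ≤ k) (c : Bool)
    (h : t.getLast? = some (!c)) :
    pvRuns (t ++ List.replicate k c) = 1 + pvRuns t := by
  rw [← pvRuns_reverse, List.reverse_append, List.reverse_replicate,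
    pvRuns_replicate_append_ne k hk c t.reverse (by rwa [List.head?_reverse]),
    pvRuns_reverse]

theorem pvGetLast?_append_replicate (t : List Bool) (k : Nat) (c : Bool)
    (h : t.getLast? = some c) :
    (t ++ List.replicate k c).getLast? = some c := by
  cases k with
  | zero => simpa using h
  | succ m =>
    rw [List.getLast?_append_of_ne_nil _ (by simp)]
    rw [List.replicate_succ', List.getLast?_append_of_ne_nil _ (by simp)]
    rfl

theorem pvMapIdx_id (t : List Bool) : t.mapIdx (fun _ x => x) = t := by
  induction t with
  | nil => rfl
  | cons a s ih => rw [List.mapIdx_cons, ih]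

theorem pvMapIdx_if_lt (p : List Bool) (i : Nat) :
    p.mapIdx (fun idx x => if idx < i then !x else x)
      = (p.take i).map (fun x => !x) ++ p.drop i := by
  induction p generalizing i with
  | nil => simp
  | cons a t ih =>
    rw [List.mapIdx_cons]
    cases i with
    | zero =>
      simp only [Nat.not_lt_zero, if_false, List.take_zero, List.map_nil, List.nil_append,
        List.drop_zero]
      exact congrArg (fun l => a :: l) (pvMapIdx_id t)
    | succ j =>
      have hf : (fun (idx : Nat) (x : Bool) => if idx + 1 < j + 1 then !x else x)
          = fun idx x => if idx < j then !x else x := by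
        funext idx x
        simp [Nat.add_lt_add_iff_right]
      have h0 : (if (0 : Nat) < j + 1 then !a else a) = !a := by simp
      rw [hf, ih j, h0, List.take_succ_cons, List.map_cons, List.drop_succ_cons,
        List.cons_append]

theorem pvFlip_eq (p : List Bool) (i : Nat) (h : i ≤ p.length) :
    FlipPancakesL p i = ((p.take i).map (fun x => !x)).reverse ++ p.drop i := by
  simp only [FlipPancakesL, pvMapIdx_if_lt]
  have hA : ((p.take i).map (fun x => !x)).length = i := by
    simp [List.length_take]; omega
  have htg : ∀ (A B : List Bool), A.length = i → (A ++ B).take i = A := by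
    rintro A B rfl; exact List.take_left
  have hdg : ∀ (A B : List Bool), A.length = i → (A ++ B).drop i = B := by
    rintro A B rfl; exact List.drop_left
  have ht := htg _ (p.drop i) hA
  have hd := hdg _ (p.drop i) hA
  split_ifs with h2
  · rw [ht, hd]
  · have hrev : ((p.take i).map (fun x => !x)).reverse = (p.take i).map (fun x => !x) := by
      rcases hl : (p.take i).map (fun x => !x) with _ | ⟨x, _ | ⟨y, s⟩⟩
      · rfl
      · rfl
      · exfalso; rw [hl] at hA; simp at hA; omega
    rw [hrev]

theorem pvReplicate_of_not_mem (l : List Bool) (h : false ∉ l) :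
    l = List.replicate l.length true := by
  rw [List.eq_replicate_iff]
  refine ⟨rfl, fun b hb => ?_⟩
  cases b with
  | false => exact absurd hb h
  | true => rfl

-- the flip performed by one iteration of A's loop removes exactly one run boundary
theorem pvStep_mval (p : List Bool) (h : ¬ p.all id) :
    pvMval (FlipPancakesL p (pancakeIdx p)) + 1 = pvMval p := by
  have hmem : false ∈ p := by
    by_contra hf
    apply h
    rw [List.all_eq_true]
    intro x hx
    cases x with
    | false => exact absurd hx hf
    | true => rfl
  obtain ⟨a, t, rfl⟩ : ∃ a t, p = a :: t := by
    cases p with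
    | nil => simp at hmem
    | cons a t => exact ⟨a, t, rfl⟩
  cases a with
  | true =>
    have hget0 : PySem.List.pyGetD (true :: t) 0 false = true := by simp [pysem]
    obtain ⟨k, hk⟩ : ∃ k, PySem.List.index? (true :: t) false = some k := by
      rcases hk : PySem.List.index? (true :: t) false with _ | k
      · rw [PySem.List.index?_eq_none_iff] at hk
        exact absurd hmem hk
      · exact ⟨k, rfl⟩
    obtain ⟨pre, suf, hdecomp, hlen, hnot⟩ := (PySem.List.index?_eq_some_iff _ _ _).mp hk
    have hpre : pre = List.replicate k true := by
      rw [← hlen]; exact pvReplicate_of_not_mem pre hnot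
    have hk1 : 1 ≤ k := by
      rcases pre with _ | ⟨x, pre'⟩
      · simp at hdecomp
      · simp at hlen; omega
    have hidx : pancakeIdx (true :: t) = k := by
      unfold pancakeIdx
      rw [hget0, hk]
      simp
    have hkle : k ≤ (true :: t).length := by
      rw [hdecomp, hpre]; simp
    rw [hidx, pvFlip_eq _ k hkle, hdecomp, hpre]
    have htake : (List.replicate k true ++ false :: suf).take k = List.replicate k true := by
      have h1 : (List.replicate k true ++ false :: suf).take (List.replicate k true).length
          = List.replicate k true := List.take_left
      rwa [List.length_replicate] at h1
    have hdrop : (List.replicate k true ++ false :: suf).drop k = false :: suf := by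
      have h1 : (List.replicate k true ++ false :: suf).drop (List.replicate k true).length
          = false :: suf := List.drop_left
      rwa [List.length_replicate] at h1
    rw [htake, hdrop, List.map_replicate, List.reverse_replicate]
    have r1 : pvRuns (List.replicate k (!true) ++ false :: suf) = pvRuns (false :: suf) :=
      pvRuns_replicate_append_eq k (!true) (false :: suf) rfl
    have r2 : pvRuns (List.replicate k true ++ false :: suf) = 1 + pvRuns (false :: suf) :=
      pvRuns_replicate_append_ne k hk1 true (false :: suf) rfl
    have l1 : (List.replicate k (!true) ++ false :: suf).getLast? = (false :: suf).getLast? :=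
      List.getLast?_append_of_ne_nil _ (by simp)
    have l2 : (List.replicate k true ++ false :: suf).getLast? = (false :: suf).getLast? :=
      List.getLast?_append_of_ne_nil _ (by simp)
    have hpos : 0 < pvRuns (false :: suf) := pvRuns_pos _ _
    simp only [pvMval, r1, r2, l1, l2]
    split_ifs <;> omega
  | false =>
    have hget0 : PySem.List.pyGetD (false :: t) 0 false = false := by simp [pysem]
    have hmemrev : false ∈ (false :: t).reverse := by simpa using hmem
    obtain ⟨j, hj⟩ : ∃ j, PySem.List.index? (false :: t).reverse false = some j := by
      rcases hj : PySem.List.index? (false :: t).reverse false with _ | j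
      · rw [PySem.List.index?_eq_none_iff] at hj
        exact absurd hmemrev hj
      · exact ⟨j, rfl⟩
    obtain ⟨pre, suf, hdecomp, hlen, hnot⟩ := (PySem.List.index?_eq_some_iff _ _ _).mp hj
    have hpre : pre = List.replicate j true := by
      rw [← hlen]; exact pvReplicate_of_not_mem pre hnot
    have hp2 : (false :: t) = (suf.reverse ++ [false]) ++ List.replicate j true := by
      have h1 := congrArg List.reverse hdecomp
      rw [List.reverse_reverse, hpre] at h1
      rw [h1, List.reverse_append, List.reverse_cons, List.reverse_replicate,
        List.append_assoc]
    have hlens : (false :: t).length = suf.reverse.length + 1 + j := by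
      rw [hp2]; simp; omega
    have hidx : pancakeIdx (false :: t) = suf.reverse.length + 1 := by
      unfold pancakeIdx
      rw [hget0, hj]
      simp only [Bool.false_eq_true, if_false, Option.getD_some]
      omega
    have hle : suf.reverse.length + 1 ≤ (false :: t).length := by omega
    rw [hidx, pvFlip_eq _ _ hle, hp2]
    have hlen2 : (suf.reverse ++ [false]).length = suf.reverse.length + 1 := by simp
    have htake : ((suf.reverse ++ [false]) ++ List.replicate j true).take (suf.reverse.length + 1)
        = suf.reverse ++ [false] := by
      have h1 : ((suf.reverse ++ [false]) ++ List.replicate j true).take (suf.reverse ++ [false]).length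
          = suf.reverse ++ [false] := List.take_left
      rwa [hlen2] at h1
    have hdrop : ((suf.reverse ++ [false]) ++ List.replicate j true).drop (suf.reverse.length + 1)
        = List.replicate j true := by
      have h1 : ((suf.reverse ++ [false]) ++ List.replicate j true).drop (suf.reverse ++ [false]).length
          = List.replicate j true := List.drop_left
      rwa [hlen2] at h1
    rw [htake, hdrop]
    have hqlast : (((suf.reverse ++ [false]).map (fun x => !x)).reverse).getLast? = some true := by
      rw [List.getLast?_reverse, List.head?_map]
      rcases hs : suf.reverse with _ | ⟨x, s'⟩
      · rfl
      · have hx : x = false := by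
          rw [hs] at hp2
          have h2 := congrArg List.head? hp2
          simpa using h2
        simp [hx]
    have r1 : pvRuns (((suf.reverse ++ [false]).map (fun x => !x)).reverse ++ List.replicate j true)
        = pvRuns (suf.reverse ++ [false]) := by
      rw [pvRuns_append_replicate_eq _ j true hqlast, pvRuns_reverse, pvRuns_map_not]
    have lq : ((((suf.reverse ++ [false]).map (fun x => !x)).reverse) ++ List.replicate j true).getLast?
        = some true := pvGetLast?_append_replicate _ j true hqlast
    have hlastsf : (suf.reverse ++ [false]).getLast? = some false := by
      rw [List.getLast?_append_of_ne_nil _ (by simp)]; rfl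
    have r2 : pvRuns ((suf.reverse ++ [false]) ++ List.replicate j true)
        = pvRuns (suf.reverse ++ [false]) + (if j = 0 then 0 else 1) := by
      cases j with
      | zero => simp
      | succ m =>
        rw [pvRuns_append_replicate_ne _ (m + 1) (by omega) true (by simpa using hlastsf)]
        simp; omega
    have l2 : ((suf.reverse ++ [false]) ++ List.replicate j true).getLast?
        = if j = 0 then some false else some true := by
      cases j with
      | zero => simpa using hlastsf
      | succ m =>
        rw [List.getLast?_append_of_ne_nil _ (by simp),
          List.replicate_succ', List.getLast?_append_of_ne_nil _ (by simp)]
        rfl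
    have hpos : 0 < pvRuns (suf.reverse ++ [false]) := pvRuns_pos' _ (by simp)
    simp only [pvMval, r1, lq, r2, l2]
    by_cases hj0 : j = 0 <;> simp [hj0] <;> omega


theorem pvRuns_replicate (n : Nat) (c : Bool) :
    pvRuns (List.replicate n c) = if n = 0 then 0 else 1 := by
  cases n with
  | zero => rfl
  | succ m =>
    rw [List.replicate_succ', pvRuns_replicate_append_eq m c [c] rfl]
    simp [pvRuns]

theorem pvMval_all_true (p : List Bool) (h : p.all id) : pvMval p = 0 := by
  have hrep : p = List.replicate p.length true := by
    rw [List.eq_replicate_iff]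
    refine ⟨rfl, fun b hb => ?_⟩
    have := List.all_eq_true.mp h b hb
    simpa using this
  rw [pvMval, hrep, pvRuns_replicate]
  cases hl : p.length with
  | zero => simp
  | succ m =>
    have hlast : (List.replicate (m + 1) true).getLast? = some true := by
      rw [List.replicate_succ', List.getLast?_append_of_ne_nil _ (by simp)]
      rfl
    simp [hlast]

theorem solveLoop_eq (n : Nat) (p : List Bool) (c : Int) (hn : pvMval p ≤ n) :
    solveLoop n p c = c + (pvMval p : Int) := by
  induction n generalizing p c with
  | zero =>
    have h0 : pvMval p = 0 := by omega
    simp [solveLoop, h0]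
  | succ n ih =>
    show (if p.all id then c else solveLoop n (FlipPancakesL p (pancakeIdx p)) (c + 1))
        = c + (pvMval p : Int)
    split_ifs with hall
    · rw [pvMval_all_true p hall]; simp
    · have hs := pvStep_mval p hall
      rw [ih _ (c + 1) (by omega)]
      omega

theorem pvRuns_le_length (p : List Bool) : pvRuns p ≤ p.length := by
  induction p with
  | nil => simp [pvRuns]
  | cons a t ih =>
    rw [pvRuns_cons]
    simp only [List.length_cons]
    split_ifs <;> omega

theorem pvGetElem_last (a : Bool) (t : List Bool) :
    (a :: t)[t.length]'(by simp) = t.getLast?.getD a := by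
  induction t generalizing a with
  | nil => rfl
  | cons b s ih =>
    simp only [List.length_cons, List.getElem_cons_succ]
    exact (ih b).trans (by simp [List.getLast?_cons, List.getLastD_eq_getLast?])

theorem pvGet_neg_one (a : Bool) (t : List Bool) :
    PySem.List.pyGetD (a :: t) (-1) false = t.getLastD a := by
  simp [pysem, List.getLastD_eq_getLast?]
  exact pvGetElem_last a t

theorem pvFold_runs (l : List Bool) (b : Bool) (c : Int) :
    l.foldl (fun (acc : Int × Option Bool) x => if some x ≠ acc.2 then (acc.1 + 1, some x) else acc)
      (c, some b)
      = (c + (pvRuns (b :: l) : Int) - 1, some (l.getLastD b)) := by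
  induction l generalizing b c with
  | nil => simp [pvRuns]
  | cons x t ih =>
    by_cases hx : x = b
    · subst hx
      simp only [List.foldl_cons, ne_eq, Option.some.injEq, not_true_eq_false, if_false,
        reduceIte]
      rw [ih]
      have h1 : pvRuns (x :: x :: t) = pvRuns (x :: t) := by rw [pvRuns_cons_cons]; simp
      rw [h1]
      rw [List.getLastD_cons]
    · have hcond : (if some x ≠ some b then ((c : Int) + 1, some x) else (c, some b))
          = (c + 1, some x) := by simp [hx]
      simp only [List.foldl_cons]
      rw [hcond, ih]
      have h1 : pvRuns (b :: x :: t) = 1 + pvRuns (x :: t) := by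
        rw [pvRuns_cons]; simp [hx]
      rw [h1]
      simp only [Prod.mk.injEq]
      constructor
      · push_cast; ring
      · rw [List.getLastD_cons]

theorem alt_eq_mval (p : List Bool) : SolvePancakes_alt p = (pvMval p : Int) := by
  cases p with
  | nil => rfl
  | cons a t =>
    unfold SolvePancakes_alt
    simp only [List.foldl_cons, ne_eq, Option.some_ne_none, not_false_iff, if_true, reduceIte,
      zero_add]
    rw [pvFold_runs t a 1, pvGet_neg_one]
    have h1 : (a :: t).getLast? = some (t.getLastD a) := by simp [List.getLast?_cons]
    have hpos := pvRuns_pos a t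
    have hD : t.getLastD a = t.getLast?.getD a := by simp [List.getLastD_eq_getLast?]
    by_cases hl : t.getLast?.getD a = true <;>
      simp [pvMval, h1, hD, hl] <;> omega

-- ===== VERDICT (by name: the statement is the Claim_ definition above) =====
theorem SolvePancakes_spec : Claim_equal_SolvePancakes := by
  intro p _
  unfold Spec_SolvePancakes SolvePancakes
  have hle : pvMval p ≤ p.length + 1 := by
    have h1 := pvRuns_le_length p
    unfold pvMval
    omega
  rw [alt_eq_mval, solveLoop_eq (p.length + 1) p 0 hle, zero_add]
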